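-- pv_equiv track=rewrite | github.com/Criadocf/SEMANA-15 | 01.py | minor_colum_position
-- ===== SOURCE A (Python) =====
-- def minor_colum_position(n):
--   minor_colum = []
--   minor = 999999
--   for c in range(len(n)):
--     for d in n[c]:
--       if d < minor:
--         minor = d
--         position = n[c].index(d)
--   minor_colum.append(position)
--   return tuple(minor_colum)
-- ===== SOURCE B (Python) =====
-- def minor_colum_position(n):
--     # Two phases: find the global minimum, then locate its first row/column.
--     minor = min(d for row in n for d in row)
--     for row in n:
--         if minor in row:
--             return (row.index(minor),)
-- ===== Notes on version B (the rewrite author's own statement) =====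
-- stated objective: simpler
-- what changed: B separates the work into two passes (compute the global minimum with min(), then locate its first occurrence with 'in'/.index) instead of A's single joint pass that repeatedly re-scans the current row with .index on every improvement.
import Mathlib
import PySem

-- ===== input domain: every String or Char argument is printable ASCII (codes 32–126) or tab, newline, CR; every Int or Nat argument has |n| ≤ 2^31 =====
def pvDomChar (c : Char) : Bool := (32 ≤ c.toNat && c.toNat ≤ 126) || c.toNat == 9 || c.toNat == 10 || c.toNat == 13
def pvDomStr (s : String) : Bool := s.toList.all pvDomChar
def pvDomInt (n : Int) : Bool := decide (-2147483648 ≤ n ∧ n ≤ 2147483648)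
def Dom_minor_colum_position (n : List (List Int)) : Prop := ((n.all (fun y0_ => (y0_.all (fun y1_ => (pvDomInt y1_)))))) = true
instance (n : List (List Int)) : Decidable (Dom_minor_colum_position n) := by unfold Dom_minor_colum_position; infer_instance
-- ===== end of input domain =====

-- B splits A's joint pass into two phases (global min via min(), then locate it); objective: simpler.

-- shared tiny helper: row.index(v) as an Int (callers only use it when v ∈ row, so the default is never taken)
def idxI (row : List Int) (v : Int) : Int := (((PySem.List.index? row v).getD 0 : Nat) : Int)

-- ===== PORT A =====
def minor_colum_position (n : List (List Int)) : List Int :=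
  let st := (PySem.List.pyRange 0 (n.length : Int) 1).foldl
    (fun (st : Int × Option Int) c =>
      -- row = n[c]; c ∈ range(len(n)) so in range, default never taken
      (PySem.List.pyGetD n c []).foldl
        (fun (st : Int × Option Int) d =>
          if d < st.1 then (d, some (idxI (PySem.List.pyGetD n c []) d)) else st) st)
    (999999, none)
  match st.2 with
  | some p => [p]
  | none => []  -- Python raises UnboundLocalError here (position unbound); excluded by Pre_

-- ===== PORT B =====
def altFindRow (m : Int) : List (List Int) → List Int
  | [] => []  -- unreachable in Python B: m is the min of the flattened matrix
  | row :: rest => if m ∈ row then [idxI row m] else altFindRow m rest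

def minor_colum_position_alt (n : List (List Int)) : List Int :=
  match PySem.List.min? (n.flatMap id) (fun y => y) with
  | some m => altFindRow m n
  | none => []  -- Python raises ValueError (min of empty); excluded by Pre_

-- ===== PRECONDITION & SPEC =====
-- Pre_: some element beats A's sentinel 999999. Outside it A raises (UnboundLocalError when no element
-- is < 999999 — there B returns the true minimum's position when the matrix is non-empty; on a matrix
-- with no elements at all both raise).
def Pre_minor_colum_position (n : List (List Int)) : Prop := ∃ row ∈ n, ∃ d ∈ row, d < 999999
instance (n : List (List Int)) : Decidable (Pre_minor_colum_position n) := by unfold Pre_minor_colum_position; infer_instance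
def pvWitness_minor_colum_position : List (List Int) := [[3, 1], [2]]

def Spec_minor_colum_position (n : List (List Int)) (out : List Int) : Prop := out = minor_colum_position_alt n
instance (n : List (List Int)) (out : List Int) : Decidable (Spec_minor_colum_position n out) := by unfold Spec_minor_colum_position; infer_instance

-- ===== CLAIM (what is proved, stated in full; the proofs are below) =====
def Claim_equal_minor_colum_position : Prop := ∀ (n : List (List Int)), Dom_minor_colum_position n → Pre_minor_colum_position n → Spec_minor_colum_position n (minor_colum_position n)

-- ===== LEMMAS AND PROOFS =====

-- A's per-row step, as a function of the whole state
def innerF (st : Int × Option Int) (row : List Int) : Int × Option Int :=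
  row.foldl (fun (st : Int × Option Int) d => if d < st.1 then (d, some (idxI row d)) else st) st

lemma lm_le_init (l : List Int) (a : Int) : l.foldl min a ≤ a := by
  induction l generalizing a with
  | nil => exact le_rfl
  | cons y t ih => exact le_trans (ih (min a y)) (min_le_left _ _)

lemma lm_le_mem (l : List Int) (a : Int) : ∀ x ∈ l, l.foldl min a ≤ x := by
  induction l generalizing a with
  | nil => intro x hx; cases hx
  | cons y t ih =>
    intro x hx
    rcases List.mem_cons.mp hx with hx | hx
    · subst hx
      exact le_trans (lm_le_init t (min a x)) (min_le_right _ _)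
    · exact ih (min a y) x hx

lemma lm_mem_or (l : List Int) (a : Int) : l.foldl min a = a ∨ l.foldl min a ∈ l := by
  induction l generalizing a with
  | nil => exact Or.inl rfl
  | cons y t ih =>
    simp only [List.foldl]
    rcases ih (min a y) with h | h
    · rcases min_cases a y with ⟨h1, _⟩ | ⟨h1, _⟩
      · exact Or.inl (by rw [h, h1])
      · exact Or.inr (by rw [h, h1]; exact List.mem_cons_self)
    · exact Or.inr (List.mem_cons_of_mem _ h)

lemma lm_of_not_any (l : List Int) (a : Int) (h : ∀ x ∈ l, ¬ x < a) : l.foldl min a = a := by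
  induction l generalizing a with
  | nil => rfl
  | cons y t ih =>
    have hy : ¬ y < a := h y (by simp)
    have hmin : min a y = a := min_eq_left (le_of_not_gt hy)
    simp only [List.foldl, hmin]
    exact ih a (fun x hx => h x (List.mem_cons_of_mem _ hx))

lemma lm_lt_of_any (l : List Int) (a : Int) (h : ∃ x ∈ l, x < a) : l.foldl min a < a := by
  obtain ⟨x, hx, hlt⟩ := h
  exact lt_of_le_of_lt (lm_le_mem l a x hx) hlt

lemma lm_mem_of_lt (l : List Int) (a : Int) (h : l.foldl min a < a) : l.foldl min a ∈ l := by
  rcases lm_mem_or l a with h1 | h1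
  · omega
  · exact h1

lemma lm_min (t : List Int) (a b : Int) : t.foldl min (min a b) = min a (t.foldl min b) := by
  induction t generalizing b with
  | nil => rfl
  | cons x s ih => simp only [List.foldl, min_assoc, ih]

-- characterization of A's inner (per-row) loop, for an arbitrary captured row row₀
lemma inner_char (row₀ l : List Int) (a : Int) (pos : Option Int) :
    l.foldl (fun (st : Int × Option Int) d => if d < st.1 then (d, some (idxI row₀ d)) else st) (a, pos)
    = (l.foldl min a,
       if ∃ d ∈ l, d < a then some (idxI row₀ (l.foldl min a)) else pos) := by
  induction l generalizing a pos with
  | nil => simp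
  | cons d rest ih =>
    simp only [List.foldl]
    by_cases hd : d < a
    · have hmin : min a d = d := min_eq_right (le_of_lt hd)
      have h3 : ∃ e ∈ d :: rest, e < a := ⟨d, by simp, hd⟩
      rw [if_pos hd, ih d (some (idxI row₀ d)), hmin, if_pos h3]
      by_cases h2 : ∃ e ∈ rest, e < d
      · rw [if_pos h2]
      · have h4 : rest.foldl min d = d := by
          refine lm_of_not_any rest d (fun x hx hlt => h2 ⟨x, hx, hlt⟩)
        rw [if_neg h2, h4]
    · have hmin : min a d = a := min_eq_left (le_of_not_gt hd)
      rw [if_neg hd, ih a pos, hmin]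
      have hiff : (∃ e ∈ d :: rest, e < a) ↔ (∃ e ∈ rest, e < a) := by
        constructor
        · rintro ⟨e, he, hlt⟩
          rcases List.mem_cons.mp he with he | he
          · exact absurd (he ▸ hlt) hd
          · exact ⟨e, he, hlt⟩
        · rintro ⟨e, he, hlt⟩; exact ⟨e, List.mem_cons_of_mem _ he, hlt⟩
      rw [if_congr hiff rfl rfl]

lemma outer_id (n : List (List Int)) (a : Int) (pos : Option Int)
    (h : ∀ d ∈ n.flatMap id, ¬ d < a) : n.foldl innerF (a, pos) = (a, pos) := by
  induction n with
  | nil => rfl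
  | cons row rest ih =>
    have hrow : ∀ d ∈ row, ¬ d < a := fun d hd => h d (by simp [hd])
    have h1 : innerF (a, pos) row = (a, pos) := by
      rw [innerF, inner_char]
      have hne : ¬ ∃ d ∈ row, d < a := fun ⟨x, hx, hlt⟩ => hrow x hx hlt
      simp [hne, lm_of_not_any row a hrow]
    simp only [List.foldl, h1]
    exact ih (fun d hd => h d (by simp at hd ⊢; exact Or.inr hd))

lemma outer_char (n : List (List Int)) (a : Int) (pos : Option Int)
    (h : ∃ d ∈ n.flatMap id, d < a) :
    ∃ p : Int, n.foldl innerF (a, pos) = ((n.flatMap id).foldl min a, some p)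
             ∧ altFindRow ((n.flatMap id).foldl min a) n = [p] := by
  induction n generalizing a pos with
  | nil => simp at h
  | cons row rest ih =>
    have hflat : (row :: rest).flatMap id = row ++ rest.flatMap id := by simp
    have hsplit : ((row :: rest).flatMap id).foldl min a
        = (rest.flatMap id).foldl min (row.foldl min a) := by
      rw [hflat, List.foldl_append]
    set m₁ := row.foldl min a with hm₁
    have hstep : (row :: rest).foldl innerF (a, pos)
        = rest.foldl innerF (innerF (a, pos) row) := rfl
    have hinner : innerF (a, pos) row
        = (m₁, if ∃ d ∈ row, d < a then some (idxI row m₁) else pos) := by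
      rw [innerF, inner_char]
    by_cases h2 : ∃ d ∈ rest.flatMap id, d < m₁
    · obtain ⟨p, hp1, hp2⟩ := ih m₁ (if ∃ d ∈ row, d < a then some (idxI row m₁) else pos) h2
      refine ⟨p, ?_, ?_⟩
      · rw [hstep, hinner, hp1, hsplit]
      · rw [hsplit]
        have hM : (rest.flatMap id).foldl min m₁ < m₁ := lm_lt_of_any _ _ h2
        have hnot : (rest.flatMap id).foldl min m₁ ∉ row := by
          intro hmem
          exact absurd (lm_le_mem row a _ hmem) (not_le.mpr hM)
        rw [altFindRow, if_neg hnot]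
        exact hp2
    · -- no further improvement in the remaining rows: row produced the final state
      have hrowany : ∃ d ∈ row, d < a := by
        rcases h with ⟨d, hd, hlt⟩
        rw [hflat] at hd
        rcases List.mem_append.mp hd with hd | hd
        · exact ⟨d, hd, hlt⟩
        · have h3 : m₁ ≤ d := le_of_not_gt (fun hlt => h2 ⟨d, hd, hlt⟩)
          have h4 : m₁ < a := lt_of_le_of_lt h3 hlt
          exact ⟨m₁, lm_mem_of_lt row a h4, h4⟩
      have hm₁lt : m₁ < a := lm_lt_of_any row a hrowany
      have hm₁mem : m₁ ∈ row := lm_mem_of_lt row a hm₁lt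
      have hrest : (rest.flatMap id).foldl min m₁ = m₁ :=
        lm_of_not_any _ _ (fun x hx hlt => h2 ⟨x, hx, hlt⟩)
      refine ⟨idxI row m₁, ?_, ?_⟩
      · rw [hstep, hinner, if_pos hrowany, hsplit, hrest]
        exact outer_id rest m₁ _ (fun x hx hlt => h2 ⟨x, hx, hlt⟩)
      · rw [hsplit, hrest, altFindRow, if_pos hm₁mem]

lemma minA_eq (flat : List Int) (h : ∃ d ∈ flat, d < 999999) :
    PySem.List.min? flat (fun y => y) = some (flat.foldl min 999999) := by
  cases flat with
  | nil => simp at h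
  | cons x t =>
    rw [PySem.List.min?_id_cons]
    have hfold : (x :: t).foldl min 999999 = min 999999 (t.foldl min x) := by
      simp only [List.foldl]
      exact lm_min t 999999 x
    have hlt : (x :: t).foldl min 999999 < 999999 := lm_lt_of_any _ _ h
    rw [hfold] at hlt ⊢
    rcases min_cases (999999 : Int) (t.foldl min x) with ⟨h1, _⟩ | ⟨h1, _⟩
    · rw [h1] at hlt; omega
    · rw [h1]

-- ===== VERDICT (by name: the statement is the Claim_ definition above) =====
theorem minor_colum_position_spec : Claim_equal_minor_colum_position := by
  intro n _ hpre
  obtain ⟨row, hrow, d, hd, hlt⟩ := hpre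
  have hflat : ∃ e ∈ n.flatMap id, e < (999999 : Int) :=
    ⟨d, List.mem_flatMap.mpr ⟨row, hrow, hd⟩, hlt⟩
  obtain ⟨p, hp1, hp2⟩ := outer_char n 999999 none hflat
  have hA : minor_colum_position n = [p] := by
    rw [minor_colum_position]
    have hbridge : (PySem.List.pyRange 0 (n.length : Int) 1).foldl
        (fun (st : Int × Option Int) c =>
          (PySem.List.pyGetD n c []).foldl
            (fun (st : Int × Option Int) d =>
              if d < st.1 then (d, some (idxI (PySem.List.pyGetD n c []) d)) else st) st)
        (999999, none) = n.foldl innerF (999999, none) :=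
      PySem.List.foldl_pyRange_zero_pyGetD' n [] innerF (999999, none)
    simp only [hbridge, hp1]
  have hB : minor_colum_position_alt n = [p] := by
    rw [minor_colum_position_alt, minA_eq (n.flatMap id) hflat]
    exact hp2
  rw [Spec_minor_colum_position, hA, hB]
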